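-- pv_equiv track=rewrite | github.com/omikad/omikad-stuff | Pythoning/problems/codejam/2014/reordering_train_cars_1cb.py | check
-- ===== SOURCE A (Python) =====
-- def check(s):
--     forbids = set()
--     cur = s[0]
--     for c in s:
--         if c in forbids:
--             return False
--         if c != cur:
--             forbids.add(cur)
--             cur = c
--     return True
-- ===== SOURCE B (Python) =====
-- def check(s):
--     # Stage 1: compress s into its run keys (one char per maximal run).
--     keys = []
--     for c in s:
--         if not keys or keys[-1] != c:
--             keys.append(c)
--     # Stage 2: the blocks are contiguous iff no run key repeats.
--     return len(keys) == len(set(keys))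
-- ===== Notes on version B (the rewrite author's own statement) =====
-- stated objective: simpler
-- what changed: B first compresses the string into its run keys and then checks that no key repeats (len(keys) == len(set(keys))), replacing A's single-pass scan with a forbidden-set and a tracked current character.
import Mathlib
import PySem

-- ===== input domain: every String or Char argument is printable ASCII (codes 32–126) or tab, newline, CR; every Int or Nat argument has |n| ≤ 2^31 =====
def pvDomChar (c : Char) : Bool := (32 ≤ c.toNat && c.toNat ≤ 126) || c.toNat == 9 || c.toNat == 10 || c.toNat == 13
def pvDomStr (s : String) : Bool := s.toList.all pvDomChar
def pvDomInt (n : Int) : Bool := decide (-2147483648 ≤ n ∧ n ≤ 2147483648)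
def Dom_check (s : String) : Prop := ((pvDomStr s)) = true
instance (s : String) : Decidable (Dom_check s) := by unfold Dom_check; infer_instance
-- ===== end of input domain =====

-- B collapses the string to its run keys first and then checks the keys are all distinct;
-- equivalence is about the return value (A raises IndexError on "" — excluded by Pre_check; B returns True there).

-- ===== PORT A =====
-- A's loop: early return False on a forbidden char, otherwise track the current run char.
def checkLoop : List Char → PySem.Set Char → Char → Bool
  | [], _, _ => true
  | c :: rest, forbids, cur =>
    if PySem.Set.contains forbids c then false
    else if c ≠ cur then checkLoop rest (PySem.Set.add forbids cur) c
    else checkLoop rest forbids cur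

def check (s : String) : Bool :=
  match PySem.Str.pyGet? s 0 with
  | none => false          -- unreachable under Pre_check: Python raises IndexError here
  | some cur => checkLoop s.toList PySem.Set.empty cur

-- ===== PORT B =====
-- keys.append(c) when keys is empty or keys[-1] != c
def altStep (keys : List Char) (c : Char) : List Char :=
  if keys.isEmpty || PySem.List.pyGet? keys (-1) ≠ some c then keys ++ [c] else keys

def check_alt (s : String) : Bool :=
  let keys := s.toList.foldl altStep []
  decide (keys.length = (PySem.Set.ofList keys).length)

-- ===== PRECONDITION & SPEC =====
-- Pre_ excludes only the empty string, on which A raises IndexError (s[0]).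
def Pre_check (s : String) : Prop := s ≠ ""
instance (s : String) : Decidable (Pre_check s) := by unfold Pre_check; infer_instance
def pvWitness_check : String := "aab"

def Spec_check (s : String) (out : Bool) : Prop := out = check_alt s
instance (s : String) (out : Bool) : Decidable (Spec_check s out) := by unfold Spec_check; infer_instance

-- ===== CLAIM (what is proved, stated in full; the proofs are below) =====
def Claim_equal_check : Prop := ∀ (s : String), Dom_check s → Pre_check s → Spec_check s (check s)

-- ===== LEMMAS AND PROOFS =====

-- the sequence of run keys of cur :: l, cur being the current run's character
def runKeys : Char → List Char → List Char
  | cur, [] => [cur]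
  | cur, c :: t => if c = cur then runKeys cur t else cur :: runKeys c t

lemma runKeys_cons (cur c : Char) (t : List Char) :
    runKeys cur (c :: t) = if c = cur then runKeys cur t else cur :: runKeys c t := rfl

lemma self_mem_runKeys (cur : Char) (l : List Char) : cur ∈ runKeys cur l := by
  induction l generalizing cur with
  | nil => simp [runKeys]
  | cons c t ih =>
    by_cases h : c = cur <;> simp [runKeys, h, ih]

lemma checkLoop_eq (l : List Char) : ∀ (F : List Char) (cur : Char), F.Nodup → cur ∉ F →
    checkLoop l F cur = decide ((F ++ runKeys cur l).Nodup) := by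
  induction l with
  | nil =>
    intro F cur hnd hcur
    simp [checkLoop, runKeys, List.nodup_append, hnd]
    exact fun a ha h => hcur (h ▸ ha)
  | cons c t ih =>
    intro F cur hnd hcur
    by_cases hmem : c ∈ F
    · have hne : c ≠ cur := fun h => hcur (h ▸ hmem)
      have : ¬ (F ++ runKeys cur (c :: t)).Nodup := by
        intro h
        rw [List.nodup_append] at h
        exact h.2.2 c hmem c (by
          rw [runKeys_cons, if_neg hne]
          exact List.mem_cons_of_mem _ (self_mem_runKeys c t)) rfl
      simp [checkLoop, PySem.Set.contains, hmem, this]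
    · by_cases hc : c = cur
      · subst hc
        have : runKeys c (c :: t) = runKeys c t := by rw [runKeys_cons, if_pos rfl]
        simp [checkLoop, PySem.Set.contains, hmem, this, ih F c hnd hcur]
      · have hadd : PySem.Set.add F cur = F ++ [cur] := by
          simp [PySem.Set.add, PySem.Set.contains, hcur]
        have hnd' : (F ++ [cur]).Nodup := by
          simp [List.nodup_append, hnd]
          exact fun a ha h => hcur (h ▸ ha)
        have hc' : c ∉ F ++ [cur] := by simp [hmem, hc]
        have := ih (F ++ [cur]) c hnd' hc'
        simp only [checkLoop, PySem.Set.contains]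
        rw [if_neg (by simpa using hmem), if_pos (by simpa using hc), hadd, this]
        have : runKeys cur (c :: t) = cur :: runKeys c t := by
          simp [runKeys, hc]
        rw [this, List.append_cons]
        simp

lemma foldl_altStep (l : List Char) : ∀ (acc : List Char) (cur : Char),
    List.foldl altStep (acc ++ [cur]) l = acc ++ runKeys cur l := by
  induction l with
  | nil => intro acc cur; simp [runKeys]
  | cons c t ih =>
    intro acc cur
    have hlast : PySem.List.pyGet? (acc ++ [cur]) (-1) = some cur := by
      simp [PySem.List.pyGet?, PySem.List.pyIdx?]
    by_cases hc : c = cur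
    · subst hc
      have hstep : altStep (acc ++ [c]) c = acc ++ [c] := by
        simp [altStep, hlast]
      rw [List.foldl_cons, hstep, ih acc c, runKeys_cons, if_pos rfl]
    · have hstep : altStep (acc ++ [cur]) c = (acc ++ [cur]) ++ [c] := by
        simp [altStep, hlast, Ne.symm hc]
      have hrk : runKeys cur (c :: t) = cur :: runKeys c t := by
        rw [runKeys_cons, if_neg hc]
      rw [List.foldl_cons, hstep, ih (acc ++ [cur]) c, hrk]
      simp

lemma foldl_add_of_nodup (l : List Char) : ∀ (acc : List Char), l.Nodup → (∀ x ∈ l, x ∉ acc) →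
    l.foldl PySem.Set.add acc = acc ++ l := by
  induction l with
  | nil => intro acc _ _; simp
  | cons c t ih =>
    intro acc hnd hdis
    have hcacc : c ∉ acc := hdis c (by simp)
    have hadd : PySem.Set.add acc c = acc ++ [c] := by
      simp [PySem.Set.add, PySem.Set.contains, hcacc]
    rw [List.foldl_cons, hadd, ih (acc ++ [c]) (List.Nodup.of_cons hnd)]
    · simp
    · intro x hx
      simp only [List.mem_append, List.mem_singleton]
      rintro (h | rfl)
      · exact hdis x (by simp [hx]) h
      · exact (List.nodup_cons.mp hnd).1 hx

lemma foldl_add_sublist (l : List Char) : ∀ (acc : List Char),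
    ∃ l', l'.Sublist l ∧ l.foldl PySem.Set.add acc = acc ++ l' := by
  induction l with
  | nil => intro acc; exact ⟨[], by simp⟩
  | cons c t ih =>
    intro acc
    by_cases hc : PySem.Set.contains acc c
    · have hadd : PySem.Set.add acc c = acc := by
        simp [PySem.Set.add]
        simpa [PySem.Set.contains] using hc
      obtain ⟨l', hl', he⟩ := ih acc
      exact ⟨l', hl'.cons c, by rw [List.foldl_cons, hadd, he]⟩
    · have hadd : PySem.Set.add acc c = acc ++ [c] := by
        simp [PySem.Set.add]
        simpa [PySem.Set.contains] using hc
      obtain ⟨l', hl', he⟩ := ih (acc ++ [c])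
      exact ⟨c :: l', hl'.cons₂ c, by rw [List.foldl_cons, hadd, he]; simp⟩

lemma length_eq_ofList_iff (l : List Char) :
    (l.length = (PySem.Set.ofList l).length) ↔ l.Nodup := by
  constructor
  · intro h
    obtain ⟨l', hl', he⟩ := foldl_add_sublist l []
    rw [PySem.Set.ofList_eq_foldl, he] at h
    simp only [List.nil_append] at h
    have : l' = l := hl'.eq_of_length h.symm
    have := PySem.Set.nodup_ofList l
    rw [PySem.Set.ofList_eq_foldl, he] at this
    simpa [‹l' = l›] using this
  · intro h
    rw [PySem.Set.ofList_eq_foldl, foldl_add_of_nodup l [] h (by simp)]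
    simp

-- ===== VERDICT (by name: the statement is the Claim_ definition above) =====
theorem check_spec : Claim_equal_check := by
  intro s _ hpre
  have hne : s.toList ≠ [] := by
    intro h
    exact hpre (by simpa using congrArg String.ofList h)
  obtain ⟨c, rest, hcr⟩ := List.exists_cons_of_ne_nil hne
  unfold Spec_check check check_alt
  have hget : PySem.Str.pyGet? s 0 = some c := by
    simp [PySem.Str.pyGet?, hcr, PySem.Chars.pyGet?_eq_listPyGet?, PySem.List.pyGet?, PySem.List.pyIdx?]
  rw [hget, hcr]
  -- A side reduces to Nodup of the run keys
  have hA : checkLoop (c :: rest) PySem.Set.empty c = decide ((runKeys c rest).Nodup) := by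
    have h1 : checkLoop (c :: rest) PySem.Set.empty c = checkLoop rest PySem.Set.empty c := by
      simp [checkLoop, PySem.Set.contains, PySem.Set.empty]
    rw [h1, checkLoop_eq rest PySem.Set.empty c (by simp [PySem.Set.empty]) (by simp [PySem.Set.empty])]
    simp [PySem.Set.empty]
  -- B side: the fold builds exactly the run keys
  have hkeys : List.foldl altStep [] (c :: rest) = runKeys c rest := by
    have h0 : altStep [] c = [c] := by simp [altStep]
    have := foldl_altStep rest [] c
    simpa [h0] using this
  show checkLoop (c :: rest) PySem.Set.empty c = _
  rw [hA]
  simp only [hkeys]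
  rw [decide_eq_decide]
  exact (length_eq_ofList_iff (runKeys c rest)).symm
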